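-- pv_equiv track=rewrite | github.com/nickash2/local-adversial-search | nqueens.py | state_space
-- ===== SOURCE A (Python) =====
-- def state_space(board):
-- 	state_space = []
--
-- 	for column, row in enumerate(board):
-- 		for state in range(len(board)):
-- 			if state == row:
-- 				state_space.append('Q')
-- 			if state != row:
-- 				state_space.append('.')
--
-- 	return state_space
-- ===== SOURCE B (Python) =====
-- def state_space(board):
--     n = len(board)
--     res = ['.'] * (n * n)
--     for col, row in enumerate(board):
--         if 0 <= row < n:
--             res[col * n + row] = 'Q'
--     return res
-- ===== Notes on version B (the rewrite author's own statement) =====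
-- stated objective: faster
-- what changed: Instead of an n*n nested loop comparing every cell to the queen's row and appending one cell at a time, B allocates the all-dots board once and scatters each queen by a computed index col*n+row (guarded to in-range rows, matching the all-dots output for out-of-range rows).
import Mathlib
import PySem

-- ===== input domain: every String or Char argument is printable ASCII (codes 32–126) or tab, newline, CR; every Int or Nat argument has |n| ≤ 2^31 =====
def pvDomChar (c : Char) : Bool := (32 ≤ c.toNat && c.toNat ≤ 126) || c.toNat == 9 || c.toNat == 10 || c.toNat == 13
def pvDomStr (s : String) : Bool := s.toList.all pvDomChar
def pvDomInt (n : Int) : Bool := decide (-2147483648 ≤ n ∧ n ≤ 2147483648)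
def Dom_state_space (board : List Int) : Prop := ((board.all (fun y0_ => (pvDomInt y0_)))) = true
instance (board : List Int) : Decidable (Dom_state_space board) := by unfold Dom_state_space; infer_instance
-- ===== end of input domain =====

-- B replaces A's per-cell compare-and-append double loop by allocating the all-dots
-- board once and placing each queen by a computed index (objective: faster, constant factor).

-- ===== PORT A =====
-- for column, row in enumerate(board): for state in range(len(board)): two ifs appending 'Q' / '.'
def state_space (board : List Int) : List String :=
  (PySem.List.enumerate board).foldl
    (fun acc cr =>
      (PySem.List.pyRange 0 (board.length : Int) 1).foldl
        (fun acc2 state =>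
          let acc2 := if state == cr.2 then acc2 ++ ["Q"] else acc2
          if state != cr.2 then acc2 ++ ["."] else acc2)
        acc)
    []

-- ===== PORT B =====
-- res = ['.'] * (n*n); for col, row in enumerate(board): if 0 <= row < n: res[col*n + row] = 'Q'
def state_space_alt (board : List Int) : List String :=
  let n := board.length
  (PySem.List.enumerate board).foldl
    (fun res cr =>
      if 0 ≤ cr.2 ∧ cr.2 < (n : Int) then res.set (cr.1 * (n : Int) + cr.2).toNat "Q" else res)
    (List.replicate (n * n) ".")

-- ===== PRECONDITION & SPEC =====
def Spec_state_space (board : List Int) (out : List String) : Prop := out = state_space_alt board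
instance (board : List Int) (out : List String) : Decidable (Spec_state_space board out) := by unfold Spec_state_space; infer_instance

-- ===== CLAIM (what is proved, stated in full; the proofs are below) =====
def Claim_equal_state_space : Prop := ∀ (board : List Int), Dom_state_space board → Spec_state_space board (state_space board)

-- ===== LEMMAS AND PROOFS =====

/-- the row `r` rendered as one line of `n` cells, as A produces it -/
def rowline (n : Nat) (r : Int) : List String :=
  (PySem.List.pyRange 0 (n : Int) 1).map (fun s => if s = r then "Q" else ".")

/-- A's inner loop appends exactly `rowline`. -/
theorem inner_eq_rowline (n : Nat) (r : Int) (acc : List String) :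
    (PySem.List.pyRange 0 (n : Int) 1).foldl
      (fun acc2 state =>
        let acc2 := if state == r then acc2 ++ ["Q"] else acc2
        if state != r then acc2 ++ ["."] else acc2)
      acc = acc ++ rowline n r := by
  have h : (fun (acc2 : List String) (state : Int) =>
      let acc2 := if state == r then acc2 ++ ["Q"] else acc2
      if state != r then acc2 ++ ["."] else acc2)
      = fun acc2 state => acc2 ++ [if state = r then "Q" else "."] := by
    funext acc2 state
    by_cases h : state = r <;> simp [h]
  rw [h, PySem.List.foldl_append_singleton_eq_map, rowline]

/-- `rowline` is the all-dots line with one cell overwritten when the row is in range. -/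
theorem rowline_eq_set (n : Nat) (r : Int) :
    rowline n r =
      if 0 ≤ r ∧ r < (n : Int) then (List.replicate n ".").set r.toNat "Q"
      else List.replicate n "." := by
  apply List.ext_getElem
  · simp [rowline, PySem.List.length_pyRange_one]
    split_ifs <;> simp
  · intro k hk1 hk2
    have hk : k < n := by
      simpa [rowline, PySem.List.length_pyRange_one] using hk1
    simp only [rowline, List.getElem_map, PySem.List.getElem_pyRange_one]
    by_cases h : 0 ≤ r ∧ r < (n : Int)
    · simp only [if_pos h, List.getElem_set]
      split_ifs with h1 h2
      · rfl
      · exfalso; omega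
      · exfalso; omega
      · simp [List.getElem_replicate]
    · simp only [if_neg h, List.getElem_replicate]
      split_ifs with h1
      · exfalso; omega
      · rfl

/-- B's scatter fold, processing the tail `t` starting at column `k`, fills in
    each row's line in place. -/
theorem scatter_eq (n : Nat) (t : List Int) :
    ∀ (k : Nat) (pre : List String), pre.length = k * n →
    (PySem.List.enumerate t (k : Int)).foldl
      (fun res cr =>
        if 0 ≤ cr.2 ∧ cr.2 < (n : Int) then res.set (cr.1 * (n : Int) + cr.2).toNat "Q" else res)
      (pre ++ List.replicate (t.length * n) ".")
    = pre ++ t.flatMap (rowline n) := by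
  induction t with
  | nil => intro k pre _; simp [PySem.List.enumerate_nil]
  | cons r t ih =>
    intro k pre hpre
    rw [PySem.List.enumerate_cons, List.foldl_cons]
    have hsplit : List.replicate ((r :: t).length * n) "." =
        List.replicate n "." ++ List.replicate (t.length * n) "." := by
      rw [← List.replicate_add]
      congr 1
      simp [List.length_cons]
      ring
    have hstep :
        (if 0 ≤ r ∧ r < (n : Int) then
            (pre ++ List.replicate ((r :: t).length * n) ".").set ((k : Int) * (n : Int) + r).toNat "Q"
          else pre ++ List.replicate ((r :: t).length * n) ".")
        = (pre ++ rowline n r) ++ List.replicate (t.length * n) "." := by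
      rw [hsplit, rowline_eq_set, ← List.append_assoc]
      split_ifs with h
      · obtain ⟨h0, hn⟩ := h
        have hcast : ((k : Int) * (n : Int) + r).toNat = pre.length + r.toNat := by
          have hm : ((k : Int) * (n : Int)) = ((k * n : Nat) : Int) := by push_cast; ring
          rw [hm, hpre]; omega
        rw [hcast,
            List.set_append_left _ _ (by simp [List.length_replicate]; omega),
            List.set_append_right _ _ (Nat.le_add_right _ _)]
        simp
      · rfl
    rw [hstep]
    have hk1 : ((k : Int) + 1) = ((k + 1 : Nat) : Int) := by push_cast; ring
    rw [hk1, ih (k + 1) (pre ++ rowline n r)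
      (by simp [rowline, PySem.List.length_pyRange_one, hpre]; ring)]
    simp

-- ===== VERDICT (by name: the statement is the Claim_ definition above) =====
theorem state_space_spec : Claim_equal_state_space := by
  intro board _
  unfold Spec_state_space state_space state_space_alt
  simp only [inner_eq_rowline, PySem.List.foldl_append_eq_flatMap, List.nil_append]
  have hB := scatter_eq board.length board 0 [] (by simp)
  simp only [Nat.cast_zero, List.nil_append,] at hB
  rw [hB, ← List.flatMap_map Prod.snd (rowline board.length) (PySem.List.enumerate board 0),
      PySem.List.map_snd_enumerate]
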